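-- pv_equiv track=rewrite | github.com/adlzanchetta/asynch-particletracking | src/defineDistances_lib.py | classify_links
-- ===== SOURCE A (Python) =====
-- def classify_links(links_dist_dict, num_classes=5):
--     """
--
--     The lower the class, the closer to the outlet
--     :param links_dist_dict:
--     :param num_classes:
--     :return: A dictionary link_id -> class
--     """
--
--     # define thresholds
--     all_dists = sorted(links_dist_dict.values())
--     links_interval = int(len(all_dists) / num_classes)
--     thresholds = []
--     count_classes = 1
--     while count_classes < num_classes:
--         cur_idx = count_classes * links_interval
--         thresholds.append(all_dists[cur_idx])
--         count_classes += 1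
--
--     # build return dictionary
--     ret_dict = {}
--     for cur_link_id in list(links_dist_dict.keys()):
--         cur_dist = links_dist_dict[cur_link_id]
--         cur_pot_class = 1
--         while cur_pot_class < num_classes:
--             if cur_dist < thresholds[cur_pot_class-1]:
--                 ret_dict[cur_link_id] = cur_pot_class
--                 break
--             cur_pot_class += 1
--         if cur_pot_class == num_classes:
--             ret_dict[cur_link_id] = cur_pot_class
--
--     return ret_dict
-- ===== SOURCE B (Python) =====
-- def classify_links(links_dist_dict, num_classes=5):
--     """Single merge sweep over the links sorted by distance instead of a
--     per-link scan of the thresholds list."""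
--     all_dists = sorted(links_dist_dict.values())
--     links_interval = len(all_dists) // num_classes
--     thresholds = [all_dists[c * links_interval] for c in range(1, num_classes)]
--     cls = {}
--     j = 0
--     for link_id, dist in sorted(links_dist_dict.items(), key=lambda kv: kv[1]):
--         while j < len(thresholds) and dist >= thresholds[j]:
--             j += 1
--         cls[link_id] = j + 1
--     return {k: cls[k] for k in links_dist_dict}
-- ===== Notes on version B (the rewrite author's own statement) =====
-- stated objective: faster
-- what changed: A scans the thresholds list anew for every link (O(n*k) scan work); B sorts the links by distance once and classifies them in a single merge sweep that advances one shared index into the thresholds, then reads the classes back in the original key order.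
-- outside the precondition, e.g. on classify_links({1: 5}, -2): A returns {}, B returns {1: 1}
import Mathlib
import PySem

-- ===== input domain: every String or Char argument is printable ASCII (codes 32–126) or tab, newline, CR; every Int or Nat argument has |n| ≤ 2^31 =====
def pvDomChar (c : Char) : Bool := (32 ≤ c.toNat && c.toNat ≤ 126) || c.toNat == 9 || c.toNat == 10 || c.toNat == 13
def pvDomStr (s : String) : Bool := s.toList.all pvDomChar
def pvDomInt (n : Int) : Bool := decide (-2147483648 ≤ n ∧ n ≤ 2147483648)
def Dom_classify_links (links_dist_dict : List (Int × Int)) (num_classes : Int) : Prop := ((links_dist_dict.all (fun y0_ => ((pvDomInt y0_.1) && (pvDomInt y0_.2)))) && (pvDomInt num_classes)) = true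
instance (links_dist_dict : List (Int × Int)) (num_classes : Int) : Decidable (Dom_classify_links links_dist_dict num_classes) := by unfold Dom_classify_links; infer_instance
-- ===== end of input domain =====

-- B classifies the links in one merge sweep over the links sorted by distance (shared index into the
-- thresholds) instead of A's per-link scan of the thresholds list (O(n*k) scan work dropped; the timing
-- run measured B faster); same returned dict, original key order.


-- ===== PORT A =====
-- A's inner while loop: while cur_pot_class < num_classes: if dist < thresholds[cur_pot_class-1]: break/assign.
-- A always stores exactly this value under the key (the break value, or num_classes when the loop falls through).
def scanClassA (num_classes : Int) (thresholds : List Int) (dist : Int) (c : Int) : Int :=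
  if _h : c < num_classes then
    if dist < PySem.List.pyGetD thresholds (c - 1) 0 then c
    else scanClassA num_classes thresholds dist (c + 1)
  else c
termination_by (num_classes - c).toNat
decreasing_by omega

-- thresholds[i] is indexed with pyGetD 0: inside Pre_ the index is always in range (proved below);
-- on inputs where Python's all_dists[cur_idx] raises IndexError, Pre_ excludes the input.
def classify_links (links_dist_dict : List (Int × Int)) (num_classes : Int) : List (Int × Int) :=
  let d := PySem.Dict.mk links_dist_dict
  let all_dists := PySem.List.sorted d.values (fun x => x) false
  -- int(len(all_dists)/num_classes): exact floor for the nonnegative length and num_classes ≥ 1 of Pre_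
  let links_interval := PySem.Int.floordiv (all_dists.length : Int) num_classes
  let thresholds := (PySem.List.pyRange 1 num_classes 1).foldl
    (fun t c => t ++ [PySem.List.pyGetD all_dists (c * links_interval) 0]) []
  let ret := d.keys.foldl
    (fun r k => r.insert k (scanClassA num_classes thresholds (d.getD k 0) 1)) PySem.Dict.empty
  ret.items

-- ===== PORT B =====
-- B's while loop advancing the shared sweep index j.
def advanceB (thresholds : List Int) (dist : Int) (j : Nat) : Nat :=
  if _h : j < thresholds.length then
    if PySem.List.pyGetD thresholds (j : Int) 0 ≤ dist then advanceB thresholds dist (j + 1)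
    else j
  else j
termination_by thresholds.length - j

def classify_links_alt (links_dist_dict : List (Int × Int)) (num_classes : Int) : List (Int × Int) :=
  let d := PySem.Dict.mk links_dist_dict
  let all_dists := PySem.List.sorted d.values (fun x => x) false
  let links_interval := PySem.Int.floordiv (all_dists.length : Int) num_classes
  let thresholds := (PySem.List.pyRange 1 num_classes 1).map
    (fun c => PySem.List.pyGetD all_dists (c * links_interval) 0)
  let sweep := (PySem.List.sorted links_dist_dict (fun kv => kv.2) false).foldl
    (fun (s : Nat × PySem.Dict Int Int) kv =>
      let j := advanceB thresholds kv.2 s.1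
      (j, s.2.insert kv.1 ((j : Int) + 1)))
    (0, PySem.Dict.empty)
  let cls := sweep.2
  (links_dist_dict.foldl (fun r kv => r.insert kv.1 (cls.getD kv.1 0)) PySem.Dict.empty).items

-- ===== PRECONDITION & SPEC =====
-- Pre_ keeps the natural domain: a class count must be at least 1 (A raises ZeroDivisionError at 0 and
-- for negative counts silently returns an empty dict, dropping every link — outside the natural domain),
-- a nonempty dict when num_classes ≥ 2 (A raises IndexError on the empty one), and unique keys (a Python
-- dict cannot carry duplicate keys; the list encodes its items).
def Pre_classify_links (links_dist_dict : List (Int × Int)) (num_classes : Int) : Prop :=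
  1 ≤ num_classes ∧ (num_classes = 1 ∨ links_dist_dict ≠ []) ∧ (links_dist_dict.map Prod.fst).Nodup
instance (links_dist_dict : List (Int × Int)) (num_classes : Int) : Decidable (Pre_classify_links links_dist_dict num_classes) := by unfold Pre_classify_links; infer_instance

def pvWitness_classify_links : (List (Int × Int)) × Int := ([(3, 10), (7, 2), (5, 6), (9, 4)], 2)

def Spec_classify_links (links_dist_dict : List (Int × Int)) (num_classes : Int) (out : List (Int × Int)) : Prop := out = classify_links_alt links_dist_dict num_classes
instance (links_dist_dict : List (Int × Int)) (num_classes : Int) (out : List (Int × Int)) : Decidable (Spec_classify_links links_dist_dict num_classes out) := by unfold Spec_classify_links; infer_instance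

-- ===== CLAIM (what is proved, stated in full; the proofs are below) =====
def Claim_equal_classify_links : Prop := ∀ (links_dist_dict : List (Int × Int)) (num_classes : Int), Dom_classify_links links_dist_dict num_classes → Pre_classify_links links_dist_dict num_classes → Spec_classify_links links_dist_dict num_classes (classify_links links_dist_dict num_classes)

-- ===== LEMMAS AND PROOFS =====

def pvCnt (T : List Int) (dist : Int) : Nat := T.countP (fun t => decide (t ≤ dist))

lemma pvCnt_le_of_gt (T : List Int) (dist : Int) :
    ∀ (j : Nat), T.Pairwise (· ≤ ·) → (h : j < T.length) → dist < T[j] → pvCnt T dist ≤ j := by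
  induction T with
  | nil => intro j _ h; simp at h
  | cons x t ih =>
    intro j hp h hd
    rcases List.pairwise_cons.mp hp with ⟨hx, ht⟩
    cases j with
    | zero =>
      simp only [List.getElem_cons_zero] at hd
      have : pvCnt (x :: t) dist = 0 := by
        simp only [pvCnt]
        apply List.countP_eq_zero.mpr
        intro a ha
        rcases List.mem_cons.mp ha with rfl | ha'
        · simp; omega
        · have := hx a ha'; simp; omega
      omega
    | succ j =>
      simp only [List.getElem_cons_succ] at hd
      have h' : j < t.length := by simpa using h
      have := ih j ht h' hd
      simp only [pvCnt, List.countP_cons]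
      simp only [pvCnt] at this
      split_ifs <;> omega

lemma pvCnt_ge_of_le (T : List Int) (dist : Int) :
    ∀ (j : Nat), T.Pairwise (· ≤ ·) → (h : j < T.length) → T[j] ≤ dist → j + 1 ≤ pvCnt T dist := by
  induction T with
  | nil => intro j _ h; simp at h
  | cons x t ih =>
    intro j hp h hd
    rcases List.pairwise_cons.mp hp with ⟨hx, ht⟩
    cases j with
    | zero =>
      simp only [List.getElem_cons_zero] at hd
      simp only [pvCnt, List.countP_cons]
      simp [hd]
    | succ j =>
      simp only [List.getElem_cons_succ] at hd
      have h' : j < t.length := by simpa using h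
      have := ih j ht h' hd
      have hxd : x ≤ dist := le_trans (hx _ (List.getElem_mem h')) hd
      simp only [pvCnt, List.countP_cons] at this ⊢
      simp only [hxd, decide_true, if_true]
      omega

lemma pvCnt_le_length (T : List Int) (dist : Int) : pvCnt T dist ≤ T.length :=
  List.countP_le_length

lemma pvCnt_mono (T : List Int) {d d' : Int} (h : d ≤ d') : pvCnt T d ≤ pvCnt T d' := by
  apply List.countP_mono_left
  intro x _ hx
  simp at hx ⊢; omega

lemma advanceB_eq (T : List Int) (dist : Int) (hT : T.Pairwise (· ≤ ·)) :
    ∀ (j : Nat), j ≤ pvCnt T dist → advanceB T dist j = pvCnt T dist := by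
  intro j
  induction hk : T.length - j using Nat.strong_induction_on generalizing j with
  | _ n ih =>
    intro hj
    rw [advanceB]
    split_ifs with h1 h2
    · -- j < len, T[j] ≤ dist
      rw [PySem.List.pyGetD_natCast, List.getD_eq_getElem _ _ h1] at h2
      have := pvCnt_ge_of_le T dist j hT h1 h2
      subst hk
      exact ih (T.length - (j + 1)) (by omega) (j + 1) rfl this
    · -- j < len, dist < T[j]
      rw [PySem.List.pyGetD_natCast, List.getD_eq_getElem _ _ h1] at h2
      have := pvCnt_le_of_gt T dist j hT h1 (by omega)
      omega
    · have := pvCnt_le_length T dist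
      omega

lemma scanClassA_eq (nc : Int) (T : List Int) (dist : Int) (hT : T.Pairwise (· ≤ ·))
    (hlen : T.length = (nc - 1).toNat) :
    ∀ (c : Int), 1 ≤ c → c ≤ nc →
      scanClassA nc T dist c = c + ((T.drop (c - 1).toNat).countP (fun t => decide (t ≤ dist)) : Int) := by
  intro c
  induction hk : (nc - c).toNat using Nat.strong_induction_on generalizing c with
  | _ n ih =>
    intro hc1 hcn
    rw [scanClassA]
    split_ifs with h1 h2
    · -- c < nc, dist < T[c-1]
      have hidx : (c - 1).toNat < T.length := by omega
      rw [PySem.List.pyGetD_of_nonneg T 0 (by omega), List.getD_eq_getElem _ _ hidx] at h2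
      have hdrop := List.drop_eq_getElem_cons hidx
      have hp : (T.drop (c - 1).toNat).Pairwise (· ≤ ·) := hT.sublist (List.drop_sublist _ _)
      rw [hdrop] at hp ⊢
      rcases List.pairwise_cons.mp hp with ⟨hx, _⟩
      have hz : List.countP (fun t => decide (t ≤ dist)) (T[(c - 1).toNat] :: T.drop ((c - 1).toNat + 1)) = 0 := by
        apply List.countP_eq_zero.mpr
        intro a ha
        rcases List.mem_cons.mp ha with rfl | ha'
        · simp only [decide_eq_true_eq]; omega
        · have := hx a ha'; simp only [decide_eq_true_eq]; omega
      rw [hz]; omega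
    · -- c < nc, T[c-1] ≤ dist
      have hidx : (c - 1).toNat < T.length := by omega
      rw [PySem.List.pyGetD_of_nonneg T 0 (by omega), List.getD_eq_getElem _ _ hidx] at h2
      have hrec := ih (nc - (c + 1)).toNat (by omega) (c + 1) rfl (by omega) (by omega)
      rw [hrec]
      have hdrop := List.drop_eq_getElem_cons hidx
      have he1 : (c + 1 - 1).toNat = (c - 1).toNat + 1 := by omega
      rw [he1, hdrop, List.countP_cons]
      simp only [not_lt.mp h2, decide_true, if_true]
      push_cast; omega
    · -- c = nc
      have hc : c = nc := by omega
      have : T.drop (c - 1).toNat = [] := by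
        apply List.drop_eq_nil_of_le; omega
      rw [this]; simp

lemma sweep_eq (T : List Int) (hT : T.Pairwise (· ≤ ·)) :
    ∀ (items : List (Int × Int)) (j0 : Nat) (cls0 : PySem.Dict Int Int),
      items.Pairwise (fun a b => a.2 ≤ b.2) →
      (∀ kv ∈ items, j0 ≤ pvCnt T kv.2) →
      (items.foldl
        (fun (s : Nat × PySem.Dict Int Int) kv =>
          (advanceB T kv.2 s.1, s.2.insert kv.1 ((advanceB T kv.2 s.1 : Int) + 1)))
        (j0, cls0)).2
      = items.foldl (fun c kv => c.insert kv.1 ((pvCnt T kv.2 : Int) + 1)) cls0 := by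
  intro items
  induction items with
  | nil => intro j0 cls0 _ _; rfl
  | cons kv t ih =>
    intro j0 cls0 hp hj
    rcases List.pairwise_cons.mp hp with ⟨hkv, ht⟩
    have hadv : advanceB T kv.2 j0 = pvCnt T kv.2 :=
      advanceB_eq T kv.2 hT j0 (hj kv (List.mem_cons_self))
    simp only [List.foldl_cons, hadv]
    exact ih (pvCnt T kv.2) _ ht (fun kv' h' => le_trans (pvCnt_mono T (hkv kv' h')) (le_refl _))

-- T (the thresholds list) is sorted and has length (nc-1).toNat, under Pre_.
lemma thresholds_sorted (l : List (Int × Int)) (nc : Int) (h1 : 1 ≤ nc) (h2 : nc = 1 ∨ l ≠ [])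
    (s : List Int) (hs : s = PySem.List.sorted (l.map Prod.snd) (fun x => x) false)
    (iv : Int) (hiv : iv = PySem.Int.floordiv (s.length : Int) nc) :
    ((PySem.List.pyRange 1 nc 1).map (fun c => PySem.List.pyGetD s (c * iv) 0)).Pairwise (· ≤ ·) ∧
    (∀ c : Int, 1 ≤ c → c < nc → 0 ≤ c * iv ∧ c * iv < (s.length : Int)) := by
  have hiv0 : 0 ≤ iv := by
    rw [hiv, PySem.Int.floordiv_eq_ediv_of_pos (by omega)]
    exact Int.ediv_nonneg (by positivity) (by omega)
  have hivb : iv * nc ≤ (s.length : Int) := by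
    have hm := PySem.Int.floordiv_mul_add_mod (s.length : Int) nc
    have hmn := PySem.Int.mod_nonneg (s.length : Int) (b := nc) (by omega)
    rw [← hiv] at hm
    omega
  have hidx : ∀ c : Int, 1 ≤ c → c < nc → 0 ≤ c * iv ∧ c * iv < (s.length : Int) := by
    intro c hc1 hc2
    have hn1 : 1 ≤ s.length := by
      rcases h2 with h2 | h2
      · omega
      · rw [hs, PySem.List.length_sorted, List.length_map]
        cases l with
        | nil => exact absurd rfl h2
        | cons a t => simp
    constructor
    · positivity
    · by_cases hz : iv = 0
      · simp [hz]; omega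
      · have h3 : c * iv ≤ (nc - 1) * iv := mul_le_mul_of_nonneg_right (by omega) hiv0
        have h4 : (nc - 1) * iv = iv * nc - iv := by ring
        omega
  refine ⟨?_, hidx⟩
  rw [List.pairwise_map]
  apply (PySem.List.pairwise_lt_pyRange_one 1 nc).imp_of_mem
  intro a b ha hb hab
  rcases PySem.List.mem_pyRange_one.mp ha with ⟨ha1, ha2⟩
  rcases PySem.List.mem_pyRange_one.mp hb with ⟨hb1, hb2⟩
  rcases hidx a ha1 ha2 with ⟨ha0, haN⟩
  rcases hidx b hb1 hb2 with ⟨hb0, hbN⟩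
  rw [PySem.List.pyGetD_eq_getElem s 0 ha0 haN, PySem.List.pyGetD_eq_getElem s 0 hb0 hbN]
  have hle : (a * iv).toNat ≤ (b * iv).toNat := by
    have : a * iv ≤ b * iv := mul_le_mul_of_nonneg_right (by omega) hiv0
    omega
  subst hs
  exact PySem.List.sorted_id_getElem_mono _ hle (by omega)

lemma A_to_spec (l : List (Int × Int)) (nc : Int) (h1 : 1 ≤ nc)
    (hnod : (l.map Prod.fst).Nodup) (T : List Int) (hTp : T.Pairwise (· ≤ ·))
    (hTlen : T.length = (nc - 1).toNat) :
    (List.foldl (fun r k => r.insert k (scanClassA nc T ((PySem.Dict.mk l).getD k 0) 1))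
        PySem.Dict.empty (PySem.Dict.mk l).keys).items
      = l.map (fun kv => (kv.1, ((pvCnt T kv.2 : Int) + 1))) := by
  rw [show (PySem.Dict.mk l).keys = l.map Prod.fst from rfl]
  have hfresh : ∀ a ∈ l.map Prod.fst,
      (PySem.Dict.empty : PySem.Dict Int Int).contains ((fun x => x) a) = false := by
    intro a _; exact PySem.Dict.contains_empty a
  have h := PySem.Dict.items_foldl_insert_fresh (l.map Prod.fst) (fun x => x)
      (fun k => scanClassA nc T ((PySem.Dict.mk l).getD k 0) 1) PySem.Dict.empty hfresh
      (by simpa using hnod)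
  simp only [] at h
  rw [h]
  simp only [List.map_map]
  apply List.map_congr_left
  intro kv hkv
  have hget : (PySem.Dict.mk l).getD kv.1 0 = kv.2 :=
    PySem.Dict.getD_of_mem_items (PySem.Dict.mk l) (by simpa using hkv) hnod 0
  have hscan := scanClassA_eq nc T kv.2 hTp hTlen 1 (le_refl 1) h1
  simp only [Function.comp]
  rw [hget, hscan]
  norm_num [pvCnt]
  omega

lemma B_to_spec (l : List (Int × Int))
    (hnod : (l.map Prod.fst).Nodup) (T : List Int) (hTp : T.Pairwise (· ≤ ·)) :
    (l.foldl (fun r kv => r.insert kv.1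
        (((PySem.List.sorted l (fun kv => kv.2) false).foldl
            (fun (s : Nat × PySem.Dict Int Int) kv =>
              (advanceB T kv.2 s.1, s.2.insert kv.1 ((advanceB T kv.2 s.1 : Int) + 1)))
            (0, PySem.Dict.empty)).2.getD kv.1 0))
      PySem.Dict.empty).items
    = l.map (fun kv => (kv.1, ((pvCnt T kv.2 : Int) + 1))) := by
  have hperm := PySem.List.sorted_perm l (fun kv => kv.2) false
  have hnods : ((PySem.List.sorted l (fun kv => kv.2) false).map Prod.fst).Nodup :=
    ((hperm.map Prod.fst).nodup_iff).mpr hnod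
  rw [sweep_eq T hTp _ 0 PySem.Dict.empty (PySem.List.sorted_pairwise l (fun kv => kv.2))
    (fun _ _ => Nat.zero_le _)]
  have hitems := PySem.Dict.items_foldl_insert_fresh
      (PySem.List.sorted l (fun kv => kv.2) false) (fun kv => kv.1)
      (fun kv => ((pvCnt T kv.2 : Int) + 1)) PySem.Dict.empty
      (fun a _ => PySem.Dict.contains_empty a.1) hnods
  have hkeysnd : ((PySem.List.sorted l (fun kv => kv.2) false).foldl
      (fun c kv => c.insert kv.1 ((pvCnt T kv.2 : Int) + 1)) PySem.Dict.empty).keys.Nodup := by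
    rw [show ∀ (d : PySem.Dict Int Int), d.keys = d.items.map Prod.fst from fun _ => rfl, hitems]
    simpa [List.map_map, Function.comp] using hnods
  have hgetD : ∀ kv ∈ l, ((PySem.List.sorted l (fun kv => kv.2) false).foldl
      (fun c kv => c.insert kv.1 ((pvCnt T kv.2 : Int) + 1)) PySem.Dict.empty).getD kv.1 0
      = (pvCnt T kv.2 : Int) + 1 := by
    intro kv hkv
    apply PySem.Dict.getD_of_mem_items _ _ hkeysnd
    rw [hitems]
    refine List.mem_append.mpr (Or.inr ?_)
    exact List.mem_map.mpr ⟨kv, (PySem.List.mem_sorted l (fun kv => kv.2) false kv).mpr hkv, rfl⟩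
  have hfinal := PySem.Dict.items_foldl_insert_fresh l (fun kv => kv.1)
      (fun kv => ((PySem.List.sorted l (fun kv => kv.2) false).foldl
          (fun c kv => c.insert kv.1 ((pvCnt T kv.2 : Int) + 1)) PySem.Dict.empty).getD kv.1 0)
      PySem.Dict.empty (fun a _ => PySem.Dict.contains_empty a.1) hnod
  rw [hfinal]
  apply List.map_congr_left
  intro kv hkv
  dsimp only
  rw [hgetD kv hkv]

lemma main_eq (l : List (Int × Int)) (nc : Int) (h1 : 1 ≤ nc) (h2 : nc = 1 ∨ l ≠ [])
    (hnod : (l.map Prod.fst).Nodup) :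
    classify_links l nc = classify_links_alt l nc := by
  simp only [classify_links, classify_links_alt]
  rw [PySem.List.foldl_append_singleton_eq_map, List.nil_append]
  obtain ⟨hTp, _⟩ := thresholds_sorted l nc h1 h2 _ rfl _ rfl
  have hTlen : ((PySem.List.pyRange 1 nc 1).map (fun c =>
      PySem.List.pyGetD (PySem.List.sorted (l.map Prod.snd) (fun x => x) false)
        (c * PySem.Int.floordiv ((PySem.List.sorted (l.map Prod.snd) (fun x => x) false).length : Int) nc) 0)).length
      = (nc - 1).toNat := by
    simp [PySem.List.length_pyRange_one]
  exact (A_to_spec l nc h1 hnod _ hTp hTlen).trans (B_to_spec l hnod _ hTp).symm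

-- ===== VERDICT (by name: the statement is the Claim_ definition above) =====
theorem classify_links_spec : Claim_equal_classify_links := by
  intro l nc _hdom hpre
  obtain ⟨h1, h2, hnod⟩ := hpre
  exact main_eq l nc h1 h2 hnod
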